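-- pv_equiv track=rewrite | github.com/sedas02/homeworks_algorithms | Сортировка_хеш-таблицы.py | feed_animals_naive
-- ===== SOURCE A (Python) =====
-- def feed_animals_naive(animals, food):
--     if not animals or not food:
--         return 0
--     used_food = [False] * len(food)
--     count = 0
--     for age in animals:
--         for i, f in enumerate(food):
--             if not used_food[i] and f >= age:
--                 used_food[i] = True
--                 count += 1
--                 break
--     return count
-- ===== SOURCE B (Python) =====
-- # Segment tree (max) over the food list: per animal, descend to the leftmost
-- # still-available food >= age and deactivate it -- O((n+m) log m) vs A's O(n*m).
--
-- def _mx(a, b):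
--     if a is None:
--         return b
--     if b is None:
--         return a
--     return a if a >= b else b
--
--
-- def _ge(m, age):
--     return m is not None and m >= age
--
--
-- def _build(arr):
--     if len(arr) == 1:
--         return (arr[0],)
--     mid = len(arr) // 2
--     lt = _build(arr[:mid])
--     rt = _build(arr[mid:])
--     return (_mx(lt[0], rt[0]), lt, rt)
--
--
-- def _take(t, age):
--     if len(t) == 1:
--         return (None,)
--     _, lt, rt = t
--     if _ge(lt[0], age):
--         lt = _take(lt, age)
--     else:
--         rt = _take(rt, age)
--     return (_mx(lt[0], rt[0]), lt, rt)
--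
--
-- def feed_animals_naive(animals, food):
--     if not animals or not food:
--         return 0
--     tree = _build(food)
--     count = 0
--     for age in animals:
--         if _ge(tree[0], age):
--             tree = _take(tree, age)
--             count += 1
--     return count
-- ===== Notes on version B (the rewrite author's own statement) =====
-- stated objective: faster
-- what changed: Replaces A's per-animal linear rescan of the food list with a used-flags array by a max segment tree over the food list: for each animal descend to the leftmost still-available food >= age and deactivate it.
import Mathlib
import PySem

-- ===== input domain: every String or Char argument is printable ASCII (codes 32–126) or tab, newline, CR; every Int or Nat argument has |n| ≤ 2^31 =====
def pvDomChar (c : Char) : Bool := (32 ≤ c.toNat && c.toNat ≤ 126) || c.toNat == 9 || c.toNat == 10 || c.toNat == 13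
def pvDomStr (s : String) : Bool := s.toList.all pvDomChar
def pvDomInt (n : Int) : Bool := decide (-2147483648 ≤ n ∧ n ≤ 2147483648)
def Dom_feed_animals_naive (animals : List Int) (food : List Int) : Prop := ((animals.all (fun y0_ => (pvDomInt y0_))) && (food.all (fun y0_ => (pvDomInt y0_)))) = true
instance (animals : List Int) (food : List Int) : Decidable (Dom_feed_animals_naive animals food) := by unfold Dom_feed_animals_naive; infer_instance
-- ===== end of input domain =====

-- B replaces A's per-animal linear rescan (used-flags array) by a max segment tree
-- over the food list (leftmost available value >= age, then deactivate): same result,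
-- asymptotically faster (measured).

-- ===== PORT A =====
-- enumerate(food)
def pvEnumFrom (k : Nat) : List Int → List (Nat × Int)
  | [] => []
  | f :: fs => (k, f) :: pvEnumFrom (k + 1) fs

-- inner 'for i, f in enumerate(food): if not used_food[i] and f >= age: … break'
def pvInnerA (used : List Bool) (age : Int) : List (Nat × Int) → Option Nat
  | [] => none
  | (i, f) :: rest =>
    if used.getD i false = false ∧ age ≤ f then some i else pvInnerA used age rest

def pvStepA (food : List Int) (st : List Bool × Int) (age : Int) : List Bool × Int :=
  match pvInnerA st.1 age (pvEnumFrom 0 food) with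
  | some i => (st.1.set i true, st.2 + 1)
  | none => st

def feed_animals_naive (animals : List Int) (food : List Int) : Int :=
  if animals = [] ∨ food = [] then 0
  else (animals.foldl (pvStepA food) (List.replicate food.length false, 0)).2

-- ===== PORT B =====
-- segment-tree node: cached max (none = no available food in this segment)
inductive PvSeg where
  | leaf : Option Int → PvSeg
  | node : Option Int → PvSeg → PvSeg → PvSeg
deriving Repr, DecidableEq

-- _mx: max with None as -inf
def pvMx (a b : Option Int) : Option Int :=
  match a, b with
  | none, b => b
  | a, none => a
  | some x, some y => some (max x y)

def pvRoot : PvSeg → Option Int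
  | .leaf v => v
  | .node m _ _ => m

-- _ge: m is not None and m >= age
def pvGe (m : Option Int) (age : Int) : Bool :=
  match m with
  | none => false
  | some v => decide (age ≤ v)

-- _build
def pvBuild (l : List Int) : PvSeg :=
  match l with
  | [] => .leaf none          -- unreachable: Source B only builds nonempty segments
  | [a] => .leaf (some a)
  | x :: y :: rest =>
    let mid := (x :: y :: rest).length / 2
    let lt := pvBuild ((x :: y :: rest).take mid)
    let rt := pvBuild ((x :: y :: rest).drop mid)
    .node (pvMx (pvRoot lt) (pvRoot rt)) lt rt
termination_by l.length
decreasing_by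
  · simp; omega
  · simp; omega

-- _take
def pvTake : PvSeg → Int → PvSeg
  | .leaf _, _ => .leaf none
  | .node _ lt rt, age =>
    if pvGe (pvRoot lt) age then
      let lt' := pvTake lt age
      .node (pvMx (pvRoot lt') (pvRoot rt)) lt' rt
    else
      let rt' := pvTake rt age
      .node (pvMx (pvRoot lt) (pvRoot rt')) lt rt'

def pvStepB (st : PvSeg × Int) (age : Int) : PvSeg × Int :=
  if pvGe (pvRoot st.1) age then (pvTake st.1 age, st.2 + 1) else st

def feed_animals_naive_alt (animals : List Int) (food : List Int) : Int :=
  if animals = [] ∨ food = [] then 0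
  else (animals.foldl pvStepB (pvBuild food, 0)).2

-- ===== PRECONDITION & SPEC =====
def Spec_feed_animals_naive (animals : List Int) (food : List Int) (out : Int) : Prop := out = feed_animals_naive_alt animals food
instance (animals : List Int) (food : List Int) (out : Int) : Decidable (Spec_feed_animals_naive animals food out) := by unfold Spec_feed_animals_naive; infer_instance

-- ===== CLAIM (what is proved, stated in full; the proofs are below) =====
def Claim_equal_feed_animals_naive : Prop := ∀ (animals : List Int) (food : List Int), Dom_feed_animals_naive animals food → Spec_feed_animals_naive animals food (feed_animals_naive animals food)

-- ===== LEMMAS AND PROOFS =====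

-- fringe of a segment tree, left to right
def pvToL : PvSeg → List (Option Int)
  | .leaf v => [v]
  | .node _ lt rt => pvToL lt ++ pvToL rt

-- well-formed: every cached max is the max of the two children's caches
def pvWf : PvSeg → Prop
  | .leaf _ => True
  | .node m lt rt => m = pvMx (pvRoot lt) (pvRoot rt) ∧ pvWf lt ∧ pvWf rt

-- availability view of A's state: food list masked by the used flags
def pvMask : List Int → List Bool → List (Option Int)
  | [], _ => []
  | _ :: _, [] => []
  | f :: fs, u :: us => (if u then none else some f) :: pvMask fs us

-- index of the first available food ≥ age
def pvFirst (age : Int) : List (Option Int) → Option Nat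
  | [] => none
  | o :: rest => if pvGe o age then some 0 else (pvFirst age rest).map (· + 1)

-- deactivate the first available food ≥ age
def pvClear (age : Int) : List (Option Int) → List (Option Int)
  | [] => []
  | o :: rest => if pvGe o age then none :: rest else o :: pvClear age rest

theorem pvMx_none_right (a : Option Int) : pvMx a none = a := by cases a <;> rfl

theorem pvGe_mx (a b : Option Int) (age : Int) :
    pvGe (pvMx a b) age = (pvGe a age || pvGe b age) := by
  cases a <;> cases b <;> simp [pvMx, pvGe] <;> try omega

theorem pvRoot_foldr (t : PvSeg) (h : pvWf t) :
    pvRoot t = (pvToL t).foldr pvMx none := by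
  induction t with
  | leaf v => simp [pvRoot, pvToL, pvMx_none_right]
  | node m lt rt ihl ihr =>
    obtain ⟨hm, hl, hr⟩ := h
    have hassoc : ∀ a b c : Option Int, pvMx (pvMx a b) c = pvMx a (pvMx b c) := by
      intro a b c; cases a <;> cases b <;> cases c <;> simp [pvMx] <;> try omega
    have hfold : ∀ (l : List (Option Int)) (c : Option Int),
        l.foldr pvMx c = pvMx (l.foldr pvMx none) c := by
      intro l; induction l with
      | nil => intro c; simp [pvMx]
      | cons o rest ih => intro c; simp only [List.foldr_cons]; rw [ih c, hassoc]
    simp only [pvRoot, pvToL, List.foldr_append]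
    rw [hfold, ← ihl hl, ← ihr hr, hm]

theorem pvGe_root_any (t : PvSeg) (h : pvWf t) (age : Int) :
    pvGe (pvRoot t) age = (pvToL t).any (fun o => pvGe o age) := by
  rw [pvRoot_foldr t h]
  induction (pvToL t) with
  | nil => simp [pvGe]
  | cons o rest ih => simp [List.foldr, pvGe_mx, ih]

theorem pvFirst_none_iff (age : Int) (l : List (Option Int)) :
    pvFirst age l = none ↔ l.any (fun o => pvGe o age) = false := by
  induction l with
  | nil => simp [pvFirst]
  | cons o rest ih =>
    by_cases h : pvGe o age = true <;> simp [pvFirst, h, ih]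

theorem pvClear_append (age : Int) (a b : List (Option Int)) :
    pvClear age (a ++ b) =
      if a.any (fun o => pvGe o age) then pvClear age a ++ b else a ++ pvClear age b := by
  induction a with
  | nil => simp
  | cons o rest ih =>
    by_cases h : pvGe o age = true <;> simp [pvClear, h, ih] <;> split <;> simp

theorem pvTake_toL (t : PvSeg) (age : Int) (h : pvWf t) (hge : pvGe (pvRoot t) age = true) :
    pvToL (pvTake t age) = pvClear age (pvToL t) := by
  induction t with
  | leaf v =>
    simp only [pvRoot] at hge
    simp [pvTake, pvToL, pvClear, hge]
  | node m lt rt ihl ihr =>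
    obtain ⟨hm, hl, hr⟩ := h
    rw [pvRoot, hm, pvGe_mx] at hge
    by_cases hlge : pvGe (pvRoot lt) age = true
    · have hany : (pvToL lt).any (fun o => pvGe o age) = true := by
        rw [← pvGe_root_any lt hl]; exact hlge
      simp [pvTake, hlge, pvToL, pvClear_append, hany, ihl hl hlge]
    · have hrge : pvGe (pvRoot rt) age = true := by
        rcases Bool.or_eq_true_iff.mp hge with h' | h'
        · exact absurd h' hlge
        · exact h'
      have hany : (pvToL lt).any (fun o => pvGe o age) = false := by
        rw [← pvGe_root_any lt hl]; exact Bool.not_eq_true _ ▸ (by simpa using hlge)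
      simp [pvTake, hlge, pvToL, pvClear_append, hany, ihr hr hrge]

theorem pvTake_wf (t : PvSeg) (age : Int) (h : pvWf t) : pvWf (pvTake t age) := by
  induction t with
  | leaf v => trivial
  | node m lt rt ihl ihr =>
    obtain ⟨hm, hl, hr⟩ := h
    by_cases hlge : pvGe (pvRoot lt) age = true <;>
      simp [pvTake, hlge, pvWf, ihl hl, ihr hr, hl, hr]

-- the inner loop of A finds the first available food ≥ age (offset version)
theorem pvInnerA_spec (age : Int) (food : List Int) :
    ∀ (pre cur : List Bool), cur.length = food.length →
    pvInnerA (pre ++ cur) age (pvEnumFrom pre.length food) =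
      (pvFirst age (pvMask food cur)).map (pre.length + ·) := by
  induction food with
  | nil => intro pre cur _; simp [pvEnumFrom, pvInnerA, pvMask, pvFirst]
  | cons f fs ih =>
    intro pre cur hlen
    cases cur with
    | nil => simp at hlen
    | cons u us =>
      have hget : (pre ++ u :: us).getD pre.length false = u := by
        simp [List.getD_eq_getElem?_getD, List.getElem?_append_right (Nat.le_refl pre.length)]
      have hrec := ih (pre ++ [u]) us (by simpa using Nat.succ_injective hlen)
      simp only [List.append_assoc, List.singleton_append, List.length_append,
        List.length_singleton] at hrec
      cases u with
      | true =>
        have hcond : ¬((pre ++ true :: us).getD pre.length false = false ∧ age ≤ f) := by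
          simp [hget]
        simp only [pvEnumFrom, pvInnerA, if_neg hcond, hrec, pvMask, pvFirst]
        cases hof : pvFirst age (pvMask fs us) with
        | none => simp [pvGe, hof]
        | some j => simp [pvGe, hof]; omega
      | false =>
        by_cases ha : age ≤ f
        · have hcond : (pre ++ false :: us).getD pre.length false = false ∧ age ≤ f :=
            ⟨hget, ha⟩
          simp [pvEnumFrom, pvInnerA, hcond, pvMask, pvFirst, pvGe, ha]
        · have hcond : ¬((pre ++ false :: us).getD pre.length false = false ∧ age ≤ f) := by
            simp [hget, ha]
          simp only [pvEnumFrom, pvInnerA, if_neg hcond, hrec, pvMask, pvFirst]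
          cases hof : pvFirst age (pvMask fs us) with
          | none => simp [pvGe, ha, hof]
          | some j => simp [pvGe, ha, hof]; omega

-- setting the found flag corresponds to clearing the first available entry
theorem pvSet_clear (age : Int) (food : List Int) :
    ∀ (used : List Bool) (i : Nat), used.length = food.length →
    pvFirst age (pvMask food used) = some i →
    pvMask food (used.set i true) = pvClear age (pvMask food used) := by
  induction food with
  | nil => intro used i _ h; simp [pvMask, pvFirst] at h
  | cons f fs ih =>
    intro used i hlen hfi
    cases used with
    | nil => simp at hlen
    | cons u us =>
      have hrest : ∀ j, pvFirst age (pvMask fs us) = some j →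
          pvMask fs (us.set j true) = pvClear age (pvMask fs us) :=
        fun j hj => ih us j (Nat.succ_injective hlen) hj
      cases u with
      | true =>
        have hfi' : (pvFirst age (pvMask fs us)).map (· + 1) = some i := by
          simpa [pvFirst, pvMask, pvGe] using hfi
        rcases Option.map_eq_some_iff.mp hfi' with ⟨j, hj, hji⟩
        subst hji
        simp [pvMask, hrest j hj, pvClear, pvGe]
      | false =>
        by_cases ha : age ≤ f
        · have : i = 0 := by
            simp [pvMask, pvFirst, pvGe, ha] at hfi; omega
          subst this
          simp [List.set, pvMask, pvClear, pvGe, ha]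
        · have hfi' : (pvFirst age (pvMask fs us)).map (· + 1) = some i := by
            simpa [pvFirst, pvMask, pvGe, ha] using hfi
          rcases Option.map_eq_some_iff.mp hfi' with ⟨j, hj, hji⟩
          subst hji
          simp [pvMask, hrest j hj, pvClear, pvGe, ha]

-- the state invariant tying A's (used, count) to B's (tree, count)
def pvRel (food : List Int) (sa : List Bool × Int) (sb : PvSeg × Int) : Prop :=
  sa.2 = sb.2 ∧ pvWf sb.1 ∧ pvToL sb.1 = pvMask food sa.1 ∧ sa.1.length = food.length

theorem pvStep_rel (food : List Int) (sa : List Bool × Int) (sb : PvSeg × Int) (age : Int)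
    (h : pvRel food sa sb) : pvRel food (pvStepA food sa age) (pvStepB sb age) := by
  obtain ⟨hc, hwf, htl, hlen⟩ := h
  have hinner : pvInnerA sa.1 age (pvEnumFrom 0 food) =
      (pvFirst age (pvMask food sa.1)).map (0 + ·) := by
    have := pvInnerA_spec age food [] sa.1 hlen
    simpa using this
  have hroot : pvGe (pvRoot sb.1) age = (pvMask food sa.1).any (fun o => pvGe o age) := by
    rw [pvGe_root_any sb.1 hwf, htl]
  cases hfi : pvFirst age (pvMask food sa.1) with
  | none =>
    have hany : (pvMask food sa.1).any (fun o => pvGe o age) = false :=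
      (pvFirst_none_iff age _).mp hfi
    have hA : pvStepA food sa age = sa := by
      simp [pvStepA, hinner, hfi]
    have hB : pvStepB sb age = sb := by
      simp [pvStepB, hroot, hany]
    rw [hA, hB]; exact ⟨hc, hwf, htl, hlen⟩
  | some i =>
    have hany : (pvMask food sa.1).any (fun o => pvGe o age) = true := by
      by_contra h'
      have := (pvFirst_none_iff age (pvMask food sa.1)).mpr (by simpa using h')
      simp [this] at hfi
    have hge : pvGe (pvRoot sb.1) age = true := by rw [hroot]; exact hany
    have hA : pvStepA food sa age = (sa.1.set (0 + i) true, sa.2 + 1) := by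
      simp [pvStepA, hinner, hfi]
    have hB : pvStepB sb age = (pvTake sb.1 age, sb.2 + 1) := by
      simp [pvStepB, hge]
    rw [hA, hB]
    refine ⟨by simp [hc], pvTake_wf sb.1 age hwf, ?_, by simp [hlen]⟩
    rw [pvTake_toL sb.1 age hwf hge, htl, Nat.zero_add]
    exact (pvSet_clear age food sa.1 i hlen hfi).symm

theorem pvFold_rel (food : List Int) (animals : List Int) :
    ∀ (sa : List Bool × Int) (sb : PvSeg × Int), pvRel food sa sb →
    (animals.foldl (pvStepA food) sa).2 = (animals.foldl pvStepB sb).2 := by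
  induction animals with
  | nil => intro sa sb h; exact h.1
  | cons age rest ih =>
    intro sa sb h
    exact ih _ _ (pvStep_rel food sa sb age h)

theorem pvBuild_aux : ∀ (n : Nat) (l : List Int), l.length ≤ n → l ≠ [] →
    pvToL (pvBuild l) = l.map some ∧ pvWf (pvBuild l) := by
  intro n
  induction n with
  | zero =>
    intro l h hne
    cases l with
    | nil => exact absurd rfl hne
    | cons x xs => simp at h
  | succ n ih =>
    intro l hlen hne
    cases l with
    | nil => exact absurd rfl hne
    | cons x t =>
    cases t with
    | nil => exact ⟨by simp [pvBuild, pvToL], by simp [pvBuild, pvWf]⟩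
    | cons y rest =>
      simp only [pvBuild]
      simp only [List.length_cons] at hlen
      have htl : ((x :: y :: rest).take ((x :: y :: rest).length / 2)).length ≤ n := by
        simp only [List.length_take]; simp at hlen ⊢; omega
      have hdl : ((x :: y :: rest).drop ((x :: y :: rest).length / 2)).length ≤ n := by
        simp only [List.length_drop]; simp at hlen ⊢; omega
      have htne : (x :: y :: rest).take ((x :: y :: rest).length / 2) ≠ [] := by
        intro h; have := congrArg List.length h
        simp [List.length_take] at this
      have hdne : (x :: y :: rest).drop ((x :: y :: rest).length / 2) ≠ [] := by
        intro h; have := congrArg List.length h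
        simp [List.length_drop] at this; omega
      obtain ⟨hl1, hl2⟩ := ih _ htl htne
      obtain ⟨hr1, hr2⟩ := ih _ hdl hdne
      refine ⟨?_, rfl, hl2, hr2⟩
      simp only [pvToL, hl1, hr1, ← List.map_append, List.take_append_drop]

theorem pvBuild_toL (l : List Int) (hne : l ≠ []) : pvToL (pvBuild l) = l.map some :=
  (pvBuild_aux l.length l (Nat.le_refl _) hne).1

theorem pvBuild_wf (l : List Int) (hne : l ≠ []) : pvWf (pvBuild l) :=
  (pvBuild_aux l.length l (Nat.le_refl _) hne).2

theorem pvMask_replicate (l : List Int) :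
    pvMask l (List.replicate l.length false) = l.map some := by
  induction l with
  | nil => rfl
  | cons f fs ih => simp [List.replicate, pvMask, ih]

-- ===== VERDICT (by name: the statement is the Claim_ definition above) =====
theorem feed_animals_naive_spec : Claim_equal_feed_animals_naive := by
  intro animals food _
  unfold Spec_feed_animals_naive feed_animals_naive feed_animals_naive_alt
  split
  · rfl
  · rename_i hguard
    have hfood : food ≠ [] := fun h => hguard (Or.inr h)
    apply pvFold_rel
    refine ⟨rfl, pvBuild_wf food hfood, ?_, by simp⟩
    rw [pvBuild_toL food hfood, pvMask_replicate]
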